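-- pv_equiv track=rewrite | github.com/waynesun09/cicaddy | src/cicaddy/delegation/line_resolver.py | _find_exact_matches
-- ===== SOURCE A (Python) =====
-- from typing import TYPE_CHECKING, List, Optional, Tuple
--
-- def _verify_subsequent_lines(
--     new_lines: List[Tuple[int, str]],
--     start_idx: int,
--     snippet_lines: List[str],
-- ) -> bool:
--     """Verify that subsequent snippet lines match subsequent new-side lines."""
--     if len(snippet_lines) <= 1:
--         return True
--     for offset in range(1, len(snippet_lines)):
--         next_idx = start_idx + offset
--         if next_idx >= len(new_lines):
--             return False
--         _, next_content = new_lines[next_idx]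
--         expected = snippet_lines[offset].strip()
--         if expected not in next_content and next_content.strip() != expected:
--             return False
--     return True
--
-- def _find_exact_matches(
--     new_lines: List[Tuple[int, str]],
--     first_line: str,
--     snippet_lines: List[str],
-- ) -> Optional[Tuple[int, int]]:
--     """Find exact match for snippet in new-side lines.
--
--     Prefers exact equality (stripped) over substring containment.
--     Verifies subsequent lines for multi-line snippets.
--     """
--     # Pass 1: exact equality (stripped)
--     for idx, (lineno, content) in enumerate(new_lines):
--         if content.strip() == first_line:
--             if _verify_subsequent_lines(new_lines, idx, snippet_lines):
--                 end = lineno + len(snippet_lines) - 1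
--                 return (lineno, end)
--
--     # Pass 2: substring containment
--     for idx, (lineno, content) in enumerate(new_lines):
--         if first_line in content:
--             if _verify_subsequent_lines(new_lines, idx, snippet_lines):
--                 end = lineno + len(snippet_lines) - 1
--                 return (lineno, end)
--
--     return None
-- ===== SOURCE B (Python) =====
-- from typing import List, Optional, Tuple
--
-- def _verify_subsequent_lines(
--     new_lines: List[Tuple[int, str]],
--     start_idx: int,
--     snippet_lines: List[str],
-- ) -> bool:
--     """Verify that subsequent snippet lines match subsequent new-side lines."""
--     if len(snippet_lines) <= 1:
--         return True
--     for offset in range(1, len(snippet_lines)):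
--         next_idx = start_idx + offset
--         if next_idx >= len(new_lines):
--             return False
--         _, next_content = new_lines[next_idx]
--         expected = snippet_lines[offset].strip()
--         if expected not in next_content and next_content.strip() != expected:
--             return False
--     return True
--
-- def _find_exact_matches(
--     new_lines: List[Tuple[int, str]],
--     first_line: str,
--     snippet_lines: List[str],
-- ) -> Optional[Tuple[int, int]]:
--     """Single scan: an equality match returns immediately; the first verified
--     containment match is kept as a fallback used only if no equality match exists."""
--     fallback = None
--     for idx, (lineno, content) in enumerate(new_lines):
--         if content.strip() == first_line and _verify_subsequent_lines(new_lines, idx, snippet_lines):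
--             return (lineno, lineno + len(snippet_lines) - 1)
--         if fallback is None and first_line in content and _verify_subsequent_lines(new_lines, idx, snippet_lines):
--             fallback = (lineno, lineno + len(snippet_lines) - 1)
--     return fallback
-- ===== Notes on version B (the rewrite author's own statement) =====
-- stated objective: alternative
-- what changed: Replaces A's two full scans (equality pass, then containment pass) with one scan over enumerate(new_lines) that returns immediately on a verified equality match and remembers only the first verified containment match as a fallback.
import Mathlib
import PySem

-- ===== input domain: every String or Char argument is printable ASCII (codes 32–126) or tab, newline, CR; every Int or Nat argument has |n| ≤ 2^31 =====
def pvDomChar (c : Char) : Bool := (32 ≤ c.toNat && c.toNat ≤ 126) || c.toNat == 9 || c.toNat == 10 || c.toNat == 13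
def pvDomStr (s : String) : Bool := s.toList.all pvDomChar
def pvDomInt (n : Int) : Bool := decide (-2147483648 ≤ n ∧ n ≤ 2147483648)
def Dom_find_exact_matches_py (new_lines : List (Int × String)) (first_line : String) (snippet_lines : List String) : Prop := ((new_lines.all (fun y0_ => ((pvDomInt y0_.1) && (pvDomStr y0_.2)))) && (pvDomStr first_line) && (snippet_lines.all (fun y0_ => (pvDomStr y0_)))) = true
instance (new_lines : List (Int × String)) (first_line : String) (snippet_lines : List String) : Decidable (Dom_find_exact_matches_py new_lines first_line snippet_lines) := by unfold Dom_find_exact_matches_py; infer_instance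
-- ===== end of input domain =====

-- B replaces A's two full scans by one scan keeping the first verified containment
-- match as a fallback used only if no equality match exists (objective: alternative).

-- ===== PORT A =====
-- shared helper _verify_subsequent_lines (identical in Source A and Source B);
-- start_idx is an enumerate index, hence Nat; the `none` case of indexing is
-- exactly Python's `next_idx >= len(new_lines)` guard (indices are nonnegative).
def pvVerifyLoop (new_lines : List (Int × String)) (start_idx : Nat)
    (snippet_lines : List String) : List Nat → Bool
  | [] => true
  | offset :: rest =>
    let next_idx := start_idx + offset
    match new_lines[next_idx]? with
    | none => false
    | some (_, next_content) =>
      let expected := PySem.Str.strip (snippet_lines.getD offset "")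
      if !(PySem.Str.isIn expected next_content)
          && !(PySem.Str.strip next_content == expected) then false
      else pvVerifyLoop new_lines start_idx snippet_lines rest

def pvVerify (new_lines : List (Int × String)) (start_idx : Nat)
    (snippet_lines : List String) : Bool :=
  if snippet_lines.length ≤ 1 then true
  else pvVerifyLoop new_lines start_idx snippet_lines (List.range' 1 (snippet_lines.length - 1))

-- A's pass 1: exact equality (stripped); idx is the enumerate counter
def pvPassEq (new_lines : List (Int × String)) (first_line : String)
    (snippet_lines : List String) : Nat → List (Int × String) → Option (Int × Int)
  | _, [] => none
  | idx, (lineno, content) :: rest =>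
    if PySem.Str.strip content == first_line then
      if pvVerify new_lines idx snippet_lines then
        some (lineno, lineno + (snippet_lines.length : Int) - 1)
      else pvPassEq new_lines first_line snippet_lines (idx + 1) rest
    else pvPassEq new_lines first_line snippet_lines (idx + 1) rest

-- A's pass 2: substring containment
def pvPassIn (new_lines : List (Int × String)) (first_line : String)
    (snippet_lines : List String) : Nat → List (Int × String) → Option (Int × Int)
  | _, [] => none
  | idx, (lineno, content) :: rest =>
    if PySem.Str.isIn first_line content then
      if pvVerify new_lines idx snippet_lines then
        some (lineno, lineno + (snippet_lines.length : Int) - 1)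
      else pvPassIn new_lines first_line snippet_lines (idx + 1) rest
    else pvPassIn new_lines first_line snippet_lines (idx + 1) rest

def find_exact_matches_py (new_lines : List (Int × String)) (first_line : String)
    (snippet_lines : List String) : Option (Int × Int) :=
  match pvPassEq new_lines first_line snippet_lines 0 new_lines with
  | some r => some r
  | none => pvPassIn new_lines first_line snippet_lines 0 new_lines

-- ===== PORT B =====
-- B's single scan with a fallback accumulator
def pvScan (new_lines : List (Int × String)) (first_line : String)
    (snippet_lines : List String) : Nat → Option (Int × Int) → List (Int × String) → Option (Int × Int)
  | _, fallback, [] => fallback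
  | idx, fallback, (lineno, content) :: rest =>
    if PySem.Str.strip content == first_line && pvVerify new_lines idx snippet_lines then
      some (lineno, lineno + (snippet_lines.length : Int) - 1)
    else if fallback.isNone && PySem.Str.isIn first_line content
        && pvVerify new_lines idx snippet_lines then
      pvScan new_lines first_line snippet_lines (idx + 1)
        (some (lineno, lineno + (snippet_lines.length : Int) - 1)) rest
    else pvScan new_lines first_line snippet_lines (idx + 1) fallback rest

def find_exact_matches_py_alt (new_lines : List (Int × String)) (first_line : String)
    (snippet_lines : List String) : Option (Int × Int) :=
  pvScan new_lines first_line snippet_lines 0 none new_lines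

-- ===== PRECONDITION & SPEC =====
def Spec_find_exact_matches_py (new_lines : List (Int × String)) (first_line : String) (snippet_lines : List String) (out : Option (Int × Int)) : Prop := out = find_exact_matches_py_alt new_lines first_line snippet_lines
instance (new_lines : List (Int × String)) (first_line : String) (snippet_lines : List String) (out : Option (Int × Int)) : Decidable (Spec_find_exact_matches_py new_lines first_line snippet_lines out) := by unfold Spec_find_exact_matches_py; infer_instance

-- ===== CLAIM (what is proved, stated in full; the proofs are below) =====
def Claim_equal_find_exact_matches_py : Prop := ∀ (new_lines : List (Int × String)) (first_line : String) (snippet_lines : List String), Dom_find_exact_matches_py new_lines first_line snippet_lines → Spec_find_exact_matches_py new_lines first_line snippet_lines (find_exact_matches_py new_lines first_line snippet_lines)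

-- ===== LEMMAS AND PROOFS =====
-- Invariant of B's loop: the scan from any suffix with fallback fb returns the
-- equality-pass result on that suffix if any, else fb, else the containment-pass result.
theorem pvScan_eq (new_lines : List (Int × String)) (first_line : String)
    (snippet_lines : List String) :
    ∀ (l : List (Int × String)) (idx : Nat) (fb : Option (Int × Int)),
      pvScan new_lines first_line snippet_lines idx fb l
        = (pvPassEq new_lines first_line snippet_lines idx l).or
            (fb.or (pvPassIn new_lines first_line snippet_lines idx l))
  | [], idx, fb => by cases fb <;> simp [pvScan, pvPassEq, pvPassIn, Option.or]
  | (lineno, content) :: rest, idx, fb => by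
    have ih := pvScan_eq new_lines first_line snippet_lines rest (idx + 1)
    cases fb <;>
      simp only [pvScan, pvPassEq, pvPassIn] <;>
      by_cases he : (PySem.Str.strip content == first_line) = true <;>
      by_cases hv : pvVerify new_lines idx snippet_lines = true <;>
      by_cases hc : PySem.Chars.isIn first_line.toList content.toList = true <;>
      simp [he, hv, hc, ih, Option.or]

-- ===== VERDICT (by name: the statement is the Claim_ definition above) =====
theorem find_exact_matches_py_spec : Claim_equal_find_exact_matches_py := by
  intro new_lines first_line snippet_lines _
  unfold Spec_find_exact_matches_py find_exact_matches_py find_exact_matches_py_alt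
  rw [pvScan_eq]
  cases pvPassEq new_lines first_line snippet_lines 0 new_lines <;> simp [Option.or]
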